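-- pv_equiv track=rewrite | github.com/CagtayFabry/pytcs | pytcs/pytcs.py | _get_decimal_from_line
-- ===== SOURCE A (Python) =====
-- from typing import TYPE_CHECKING, KeysView, Union
--
-- def _get_decimal_from_line(line: str, delimiter: str) -> Union[None, str]:
--     """Parse the decimal character from a line of numeric values."""
--     specials = [
--         c for c in line[:-1] if (not (c.isalnum() or c in [delimiter, "-"]))
--     ]
--     decimal = "".join(set(specials))
--     if len(decimal) == 0:
--         return None
--     elif len(decimal) == 1:
--         return decimal
--     raise ValueError(f"unexpected {decimal=}")
-- ===== SOURCE B (Python) =====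
-- def _get_decimal_from_line(line, delimiter):
--     """Parse the decimal character from a line of numeric values."""
--     decimal = None
--     for c in line[:-1]:
--         if c.isalnum() or c == delimiter or c == "-":
--             continue
--         if decimal is None:
--             decimal = c
--         elif c != decimal:
--             raise ValueError(f"unexpected decimal characters {decimal!r} and {c!r}")
--     return decimal
-- ===== Notes on version B (the rewrite author's own statement) =====
-- stated objective: simpler
-- what changed: B replaces the list-comprehension + set + join pipeline with a single pass keeping one scalar 'decimal' variable, raising on the first conflicting special character.
import Mathlib
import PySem

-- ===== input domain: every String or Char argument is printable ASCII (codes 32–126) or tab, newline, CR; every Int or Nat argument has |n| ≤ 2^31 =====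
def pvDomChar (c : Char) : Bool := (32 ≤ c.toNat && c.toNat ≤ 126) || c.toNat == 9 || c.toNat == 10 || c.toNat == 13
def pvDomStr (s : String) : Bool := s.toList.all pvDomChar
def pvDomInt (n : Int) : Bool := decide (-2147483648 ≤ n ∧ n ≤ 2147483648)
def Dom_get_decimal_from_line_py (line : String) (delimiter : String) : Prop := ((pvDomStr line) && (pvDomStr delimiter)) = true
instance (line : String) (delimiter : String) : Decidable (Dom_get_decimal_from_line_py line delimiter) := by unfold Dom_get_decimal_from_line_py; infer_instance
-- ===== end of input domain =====

-- B replaces A's list/set/join pipeline by a single scan with one scalar state variable (objective: simpler).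

-- ===== PORT A =====
-- A: specials = [c for c in line[:-1] if not (c.isalnum() or c in [delimiter, "-"])];
--    decimal = "".join(set(specials)); return None / decimal / raise ValueError.
-- line[:-1] = dropLast of the char list (exact);  c in [delimiter, "-"] = the 1-char string c
-- equals delimiter or "-".  On the raise branch (≥ 2 distinct specials, excluded by Pre_) the
-- port returns none.
def get_decimal_from_line_py (line : String) (delimiter : String) : Option String :=
  let specials := line.toList.dropLast.filter
    (fun c => !(PySem.Chars.isalnum c || String.mk [c] == delimiter || c == '-'))
  let decimal := PySem.Chars.join [] ((PySem.Set.ofList specials).map (fun c => [c]))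
  if decimal.length == 0 then none
  else if decimal.length == 1 then some (String.mk decimal)
  else none  -- Python: raise ValueError (outside Pre_)

-- ===== PORT B =====
-- B: one pass over line[:-1], state 'decimal : Option Char'; conflict raises ValueError.
-- Fold state 'Option (Option Char)': outer none = the raise (unreachable inside Pre_, mapped to none).
def get_decimal_from_line_py_alt (line : String) (delimiter : String) : Option String :=
  let r := line.toList.dropLast.foldl
    (fun acc c =>
      match acc with
      | none => none  -- ValueError already raised
      | some dec =>
        if PySem.Chars.isalnum c || String.mk [c] == delimiter || c == '-' then some dec
        else match dec with
          | none => some (some c)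
          | some d => if c ≠ d then none else some dec)
    (some none)
  match r with
  | some (some c) => some (String.mk [c])
  | _ => none  -- some none: return None;  none: raise ValueError (outside Pre_)

-- ===== PRECONDITION & SPEC =====
-- Pre_ excludes exactly the inputs with ≥ 2 distinct special characters in line[:-1]:
-- there A raises ValueError (and B raises too).
def Pre_get_decimal_from_line_py (line : String) (delimiter : String) : Prop :=
  (PySem.List.dedup (line.toList.dropLast.filter
    (fun c => !(PySem.Chars.isalnum c || String.mk [c] == delimiter || c == '-')))).length ≤ 1
instance (line : String) (delimiter : String) : Decidable (Pre_get_decimal_from_line_py line delimiter) := by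
  unfold Pre_get_decimal_from_line_py; infer_instance

def pvWitness_get_decimal_from_line_py : String × String := ("1.5,2.5\n", ",")

def Spec_get_decimal_from_line_py (line : String) (delimiter : String) (out : Option String) : Prop := out = get_decimal_from_line_py_alt line delimiter
instance (line : String) (delimiter : String) (out : Option String) : Decidable (Spec_get_decimal_from_line_py line delimiter out) := by unfold Spec_get_decimal_from_line_py; infer_instance

-- ===== CLAIM (what is proved, stated in full; the proofs are below) =====
def Claim_equal_get_decimal_from_line_py : Prop := ∀ (line : String) (delimiter : String), Dom_get_decimal_from_line_py line delimiter → Pre_get_decimal_from_line_py line delimiter → Spec_get_decimal_from_line_py line delimiter (get_decimal_from_line_py line delimiter)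

-- ===== LEMMAS AND PROOFS =====

-- B's fold, abstracted over the keep-predicate.
def pvStep (keep : Char → Bool) (acc : Option (Option Char)) (c : Char) : Option (Option Char) :=
  match acc with
  | none => none
  | some dec =>
    if keep c then some dec
    else match dec with
      | none => some (some c)
      | some d => if c ≠ d then none else some dec

lemma pvFold_none (keep : Char → Bool) (cs : List Char) :
    cs.foldl (pvStep keep) none = none := by
  induction cs with
  | nil => rfl
  | cons c cs ih => simp [pvStep, ih]

lemma pvFold_some (keep : Char → Bool) (cs : List Char) (d : Char) :
    cs.foldl (pvStep keep) (some (some d)) =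
      if (cs.filter (fun c => !keep c)).all (· == d) then some (some d) else none := by
  induction cs with
  | nil => simp
  | cons c cs ih =>
    by_cases h : keep c
    · simp [pvStep, h, List.filter, ih]
    · by_cases hc : c = d
      · subst hc; simp [pvStep, h, List.filter, ih]
      · simp [pvStep, h, hc, List.filter, pvFold_none, Ne.symm hc]

-- shape of B's loop result as a function of the special-character list
def pvShape : List Char → Option (Option Char)
  | [] => some none
  | c :: rest => if rest.all (· == c) then some (some c) else none

lemma pvFold_start (keep : Char → Bool) (cs : List Char) :
    cs.foldl (pvStep keep) (some none) = pvShape (cs.filter (fun c => !keep c)) := by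
  induction cs with
  | nil => rfl
  | cons c cs ih =>
    by_cases h : keep c
    · simpa [pvStep, h, List.filter] using ih
    · simp [pvStep, h, List.filter, pvFold_some, pvShape]

lemma pvKey (sp : List Char) (hpre : (PySem.List.dedup sp).length ≤ 1) :
    (if (PySem.Chars.join [] ((PySem.Set.ofList sp).map (fun c => [c]))).length == 0 then
        (none : Option String)
     else if (PySem.Chars.join [] ((PySem.Set.ofList sp).map (fun c => [c]))).length == 1 then
        some (String.mk (PySem.Chars.join [] ((PySem.Set.ofList sp).map (fun c => [c]))))
     else none) =
    match pvShape sp with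
    | some (some c) => some (String.mk [c])
    | _ => none := by
  have hjoin : PySem.Chars.join [] ((PySem.Set.ofList sp).map (fun c => [c])) =
      PySem.List.dedup sp := by
    rw [← PySem.List.dedup_eq_ofList]
    simpa using PySem.Chars.join_nil_singletons (PySem.List.dedup sp)
  rw [hjoin]
  rcases sp with _ | ⟨c, rest⟩
  · simp [PySem.List.dedup, pvShape]
  ·
    have hmemc : c ∈ c :: rest := List.mem_cons_self ..
    have hone : ∃ y, PySem.List.dedup (c :: rest) = [y] := by
      have hcd : c ∈ PySem.List.dedup (c :: rest) := (PySem.List.mem_dedup _ _).2 hmemc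
      rcases hd : PySem.List.dedup (c :: rest) with _ | ⟨y, ys⟩
      · rw [hd] at hcd; simp at hcd
      · refine ⟨y, ?_⟩
        rw [hd, List.length_cons] at hpre
        have : ys = [] := List.eq_nil_of_length_eq_zero (by omega)
        rw [this]
    rcases hone with ⟨y, hy⟩
    have heq : ∀ x ∈ c :: rest, x = y := by
      intro x hx
      have := (PySem.List.mem_dedup _ _).2 hx
      rw [hy] at this; simpa using this
    have hcy : c = y := heq c hmemc
    have hall : rest.all (· == c) = true := by
      rw [List.all_eq_true]
      intro x hx
      have : x = y := heq x (List.mem_cons_of_mem _ hx)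
      simp [this, hcy]
    have hko : pvShape (c :: rest) = some (some c) := by
      simp [pvShape, hall]
    rw [hy, hko, hcy]
    simp

-- ===== VERDICT (by name: the statement is the Claim_ definition above) =====
theorem get_decimal_from_line_py_spec : Claim_equal_get_decimal_from_line_py := by
  intro line delimiter _ hpre
  unfold Spec_get_decimal_from_line_py
  unfold Pre_get_decimal_from_line_py at hpre
  unfold get_decimal_from_line_py get_decimal_from_line_py_alt
  have hunfB : (fun (acc : Option (Option Char)) (c : Char) => match acc with
      | none => none
      | some dec =>
        if PySem.Chars.isalnum c || String.mk [c] == delimiter || c == '-' then some dec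
        else match dec with
          | none => some (some c)
          | some d => if c ≠ d then none else some dec) =
      pvStep (fun c => PySem.Chars.isalnum c || String.mk [c] == delimiter || c == '-') := by
    funext acc c; cases acc <;> rfl
  simp only [hunfB, pvFold_start]
  exact pvKey _ hpre
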